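-- pv_equiv track=rewrite | github.com/Ez-C99/dataeng-challenge | src/data_processing.py | arrest_count_age_pd_cd
-- ===== SOURCE A (Python) =====
-- def arrest_count_age_pd_cd(data):
--     age_code_dict = {}
--     for row in data:
--         age_group = row['AGE_GROUP']
--         pd_code = row['PD_CD']
--         if age_group not in age_code_dict:
--             age_code_dict[age_group] = {}
--         if pd_code not in age_code_dict[age_group]:
--             age_code_dict[age_group][pd_code] = 0
--         age_code_dict[age_group][pd_code] += 1
--     return age_code_dict
-- ===== SOURCE B (Python) =====
-- def arrest_count_age_pd_cd(data):
--     # pass 1: flat counter keyed by (age_group, pd_code)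
--     counts = {}
--     for row in data:
--         key = (row['AGE_GROUP'], row['PD_CD'])
--         counts[key] = counts.get(key, 0) + 1
--     # pass 2: reshape the flat counter into the nested dict
--     result = {}
--     for (age, pd), c in counts.items():
--         if age not in result:
--             result[age] = {}
--         result[age][pd] = c
--     return result
-- ===== Notes on version B (the rewrite author's own statement) =====
-- stated objective: alternative
-- what changed: A builds the nested dict-of-dicts incrementally inside one loop; B first counts into a flat dict keyed by the (AGE_GROUP, PD_CD) tuple and then assembles the nested structure in a separate second pass over the counter's items.
import Mathlib
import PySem

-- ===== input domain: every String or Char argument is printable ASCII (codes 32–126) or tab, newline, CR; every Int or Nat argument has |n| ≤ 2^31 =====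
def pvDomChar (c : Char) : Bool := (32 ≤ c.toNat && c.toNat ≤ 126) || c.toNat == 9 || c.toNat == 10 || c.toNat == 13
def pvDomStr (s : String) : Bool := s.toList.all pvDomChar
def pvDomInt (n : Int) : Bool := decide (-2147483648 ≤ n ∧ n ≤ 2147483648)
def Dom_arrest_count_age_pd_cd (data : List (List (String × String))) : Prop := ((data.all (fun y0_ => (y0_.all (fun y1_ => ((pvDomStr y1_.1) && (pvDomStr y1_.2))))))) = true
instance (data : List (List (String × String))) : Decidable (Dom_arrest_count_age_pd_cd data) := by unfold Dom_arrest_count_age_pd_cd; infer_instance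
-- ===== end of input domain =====

-- B re-implements A with a different decomposition: a flat (age, pd)-keyed counter pass, then a
-- separate reshape pass into the nested dict; same O(n) cost, proved to return the same value.

-- ===== PORT A =====
-- one loop building the nested dict directly; rows with a missing key are where Python raises
-- KeyError (excluded by Pre_); the port skips them.
def arrest_count_age_pd_cd (data : List (List (String × String))) : List (String × List (String × Int)) :=
  let age_code_dict : PySem.Dict String (PySem.Dict String Int) :=
    data.foldl (fun d row =>
      match (PySem.Dict.mk row).get? "AGE_GROUP", (PySem.Dict.mk row).get? "PD_CD" with
      | some age_group, some pd_code =>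
          let d := if d.contains age_group then d else d.insert age_group PySem.Dict.empty
          let inner := d.getD age_group PySem.Dict.empty
          let inner := if inner.contains pd_code then inner else inner.insert pd_code (0 : Int)
          d.insert age_group (inner.insert pd_code (inner.getD pd_code 0 + 1))
      | _, _ => d) PySem.Dict.empty
  age_code_dict.items.map (fun q => (q.1, q.2.items))

-- ===== PORT B =====
-- pass 1: flat counter keyed by the (age, pd) pair; pass 2: reshape its items into the nested dict.
def arrest_count_age_pd_cd_alt (data : List (List (String × String))) : List (String × List (String × Int)) :=
  let counts : PySem.Dict (String × String) Int :=
    data.foldl (fun f row =>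
      match (PySem.Dict.mk row).get? "AGE_GROUP" with
      | none => f
      | some age =>
          match (PySem.Dict.mk row).get? "PD_CD" with
          | none => f
          | some pd => f.insert (age, pd) (f.getD (age, pd) 0 + 1)) PySem.Dict.empty
  let result : PySem.Dict String (PySem.Dict String Int) :=
    counts.items.foldl (fun r q =>
      let r := if r.contains q.1.1 then r else r.insert q.1.1 PySem.Dict.empty
      r.insert q.1.1 ((r.getD q.1.1 PySem.Dict.empty).insert q.1.2 q.2)) PySem.Dict.empty
  result.items.map (fun q => (q.1, q.2.items))

-- ===== PRECONDITION & SPEC =====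
-- Pre_ excludes exactly the rows on which Python's row['AGE_GROUP'] / row['PD_CD'] raises KeyError.
def Pre_arrest_count_age_pd_cd (data : List (List (String × String))) : Prop :=
  ∀ row ∈ data, "AGE_GROUP" ∈ row.map Prod.fst ∧ "PD_CD" ∈ row.map Prod.fst
instance (data : List (List (String × String))) : Decidable (Pre_arrest_count_age_pd_cd data) := by
  unfold Pre_arrest_count_age_pd_cd; infer_instance

def pvWitness_arrest_count_age_pd_cd : (List (List (String × String))) :=
  [[("AGE_GROUP", "25-44"), ("PD_CD", "101")], [("AGE_GROUP", "25-44"), ("PD_CD", "303")]]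

def Spec_arrest_count_age_pd_cd (data : List (List (String × String))) (out : List (String × List (String × Int))) : Prop := out = arrest_count_age_pd_cd_alt data
instance (data : List (List (String × String))) (out : List (String × List (String × Int))) : Decidable (Spec_arrest_count_age_pd_cd data out) := by unfold Spec_arrest_count_age_pd_cd; infer_instance

-- ===== CLAIM (what is proved, stated in full; the proofs are below) =====
def Claim_equal_arrest_count_age_pd_cd : Prop := ∀ (data : List (List (String × String))), Dom_arrest_count_age_pd_cd data → Pre_arrest_count_age_pd_cd data → Spec_arrest_count_age_pd_cd data (arrest_count_age_pd_cd data)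

-- ===== LEMMAS AND PROOFS =====

-- canonical forms of the two loop bodies
def pvStepA (d : PySem.Dict String (PySem.Dict String Int)) (k : String × String) :
    PySem.Dict String (PySem.Dict String Int) :=
  d.insert k.1 ((d.getD k.1 PySem.Dict.empty).insert k.2
    ((d.getD k.1 PySem.Dict.empty).getD k.2 0 + 1))

def pvStep2 (r : PySem.Dict String (PySem.Dict String Int)) (k : String × String) (c : Int) :
    PySem.Dict String (PySem.Dict String Int) :=
  r.insert k.1 ((r.getD k.1 PySem.Dict.empty).insert k.2 c)

def pvBump (f : PySem.Dict (String × String) Int) (k : String × String) :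
    PySem.Dict (String × String) Int :=
  f.insert k (f.getD k 0 + 1)

def pvAsm (acc : PySem.Dict String (PySem.Dict String Int))
    (l : List ((String × String) × Int)) : PySem.Dict String (PySem.Dict String Int) :=
  l.foldl (fun r q => pvStep2 r q.1 q.2) acc

-- the (age, pd) keys a data list yields, in order
def pvExtract (data : List (List (String × String))) : List (String × String) :=
  data.filterMap (fun row =>
    match (PySem.Dict.mk row).get? "AGE_GROUP", (PySem.Dict.mk row).get? "PD_CD" with
    | some a, some p => some (a, p)
    | _, _ => none)

-- list-level form of pvBump (replace the first matching key, else append)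
def pvBumpL : List ((String × String) × Int) → (String × String) → List ((String × String) × Int)
  | [], k => [(k, 1)]
  | q :: t, k => if q.1 == k then (k, q.2 + 1) :: t else q :: pvBumpL t k

theorem pv_foldl_extract {σ : Type} (g : σ → String × String → σ) :
    ∀ (data : List (List (String × String))) (init : σ),
      data.foldl (fun d row =>
        match (PySem.Dict.mk row).get? "AGE_GROUP", (PySem.Dict.mk row).get? "PD_CD" with
        | some a, some p => g d (a, p)
        | _, _ => d) init = (pvExtract data).foldl g init := by
  intro data
  induction data with
  | nil => intro init; rfl
  | cons row t ih =>
      intro init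
      simp only [List.foldl_cons, pvExtract, List.filterMap_cons]
      cases h1 : (PySem.Dict.mk row).get? "AGE_GROUP" with
      | none => simpa [pvExtract] using ih init
      | some a =>
          cases h2 : (PySem.Dict.mk row).get? "PD_CD" with
          | none => simpa [pvExtract] using ih init
          | some p => simpa [pvExtract] using ih (g init (a, p))

theorem pv_stepA_eq (d : PySem.Dict String (PySem.Dict String Int)) (a p : String) :
    (let d' := if d.contains a then d else d.insert a PySem.Dict.empty
     let inner := d'.getD a PySem.Dict.empty
     let inner' := if inner.contains p then inner else inner.insert p (0 : Int)
     d'.insert a (inner'.insert p (inner'.getD p 0 + 1))) = pvStepA d (a, p) := by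
  simp only [pvStepA]
  by_cases ha : d.contains a = true
  · simp only [ha, if_true]
    by_cases hp : (d.getD a PySem.Dict.empty).contains p = true
    · simp [hp]
    · simp only [Bool.not_eq_true] at hp
      simp [hp, PySem.Dict.getD_insert_self, PySem.Dict.insert_insert_self,
        PySem.Dict.getD_of_not_contains]
  · simp only [Bool.not_eq_true] at ha
    simp [ha, PySem.Dict.getD_insert_self, PySem.Dict.insert_insert_self,
      PySem.Dict.getD_of_not_contains, PySem.Dict.contains_empty]

theorem pv_step2_eq (r : PySem.Dict String (PySem.Dict String Int)) (a p : String) (c : Int) :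
    (let r' := if r.contains a then r else r.insert a PySem.Dict.empty
     r'.insert a ((r'.getD a PySem.Dict.empty).insert p c)) = pvStep2 r (a, p) c := by
  simp only [pvStep2]
  by_cases ha : r.contains a = true
  · simp [ha]
  · simp only [Bool.not_eq_true] at ha
    simp [ha, PySem.Dict.getD_insert_self, PySem.Dict.insert_insert_self,
      PySem.Dict.getD_of_not_contains]

-- insert at two distinct keys commutes when the first key is already present
theorem pv_insert_comm {κ ν : Type} [BEq κ] [LawfulBEq κ]
    (d : PySem.Dict κ ν) (k k' : κ) (v w : ν)
    (hk : d.contains k = true) (hne : k ≠ k') :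
    (d.insert k v).insert k' w = (d.insert k' w).insert k v := by
  have hkk' : (k' == k) = false := beq_eq_false_iff_ne.mpr (Ne.symm hne)
  have hk'k : (k == k') = false := beq_eq_false_iff_ne.mpr hne
  apply PySem.Dict.ext
  by_cases hk2 : d.contains k' = true
  · simp only [PySem.Dict.items_insert, PySem.Dict.contains_insert, hk, hk2, hkk', hk'k,
      Bool.or_true, if_true, List.map_map]
    refine List.map_congr_left ?_
    intro p _
    by_cases h1 : p.1 = k <;> by_cases h2 : p.1 = k'
    · exact absurd (h1 ▸ h2) hne
    · simp [h1, hk'k, Function.comp]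
    · simp [h2, hkk', Function.comp]
    · simp [h1, h2, Function.comp]
  · simp only [Bool.not_eq_true] at hk2
    simp only [PySem.Dict.items_insert, PySem.Dict.contains_insert, hk, hk2, hkk', hk'k,
      Bool.or_true, Bool.or_false, if_true, if_false,
      Bool.false_eq_true, List.map_append, List.map_cons, List.map_nil]

theorem pv_ssc (acc : PySem.Dict String (PySem.Dict String Int)) (a p a' p' : String)
    (c' : Int) (h : ((acc.getD a PySem.Dict.empty).get? p).isSome = true)
    (hne : (a, p) ≠ (a', p')) :
    pvStepA (pvStep2 acc (a', p') c') (a, p) = pvStep2 (pvStepA acc (a, p)) (a', p') c' := by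
  have hca : acc.contains a = true := by
    by_contra hc
    rw [Bool.not_eq_true] at hc
    simp [PySem.Dict.getD_of_not_contains, hc, PySem.Dict.get?_empty] at h
  have hcp : (acc.getD a PySem.Dict.empty).contains p = true := by
    rw [PySem.Dict.contains_eq_isSome_get?]; exact h
  by_cases ha : a = a'
  · subst ha
    have hp : p ≠ p' := fun hpp => hne (by rw [hpp])
    simp only [pvStepA, pvStep2, PySem.Dict.getD_insert_self, PySem.Dict.insert_insert_self,
      PySem.Dict.getD_insert_of_ne, hp, ne_eq, not_false_iff]
    rw [pv_insert_comm _ p p' _ c' hcp hp]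
  · have ha' : a' ≠ a := Ne.symm ha
    simp only [pvStepA, pvStep2, PySem.Dict.getD_insert_of_ne, ha, ha', ne_eq, not_false_iff]
    rw [pv_insert_comm acc a a' _ _ hca ha]

theorem pv_comm (a p : String) :
    ∀ (l : List ((String × String) × Int)) (acc : PySem.Dict String (PySem.Dict String Int)),
      (a, p) ∉ l.map Prod.fst →
      ((acc.getD a PySem.Dict.empty).get? p).isSome = true →
      pvStepA (pvAsm acc l) (a, p) = pvAsm (pvStepA acc (a, p)) l := by
  intro l
  induction l with
  | nil => intro acc _ _; rfl
  | cons q t ih =>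
      intro acc hmem h
      obtain ⟨⟨a', p'⟩, c'⟩ := q
      simp only [List.map_cons, List.mem_cons, not_or] at hmem
      have hne : (a, p) ≠ (a', p') := hmem.1
      show pvStepA (pvAsm (pvStep2 acc (a', p') c') t) (a, p) =
        pvAsm (pvStep2 (pvStepA acc (a, p)) (a', p') c') t
      have hpres : (((pvStep2 acc (a', p') c').getD a PySem.Dict.empty).get? p).isSome = true := by
        by_cases ha : a = a'
        · subst ha
          have hp : p ≠ p' := fun hpp => hne (by rw [hpp])
          simpa [pvStep2, PySem.Dict.getD_insert_self, hp,
            PySem.Dict.get?_insert_of_ne] using h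
        · simpa [pvStep2, ha, PySem.Dict.getD_insert_of_ne] using h
      rw [ih _ hmem.2 hpres, pv_ssc acc a p a' p' c' h hne]

theorem pv_bumpL_eq (k : String × String) :
    ∀ (l : List ((String × String) × Int)), (l.map Prod.fst).Nodup →
      ((PySem.Dict.mk l).insert k ((PySem.Dict.mk l).getD k 0 + 1)).items = pvBumpL l k := by
  have L1 : ∀ l : List ((String × String) × Int), k ∉ l.map Prod.fst →
      pvBumpL l k = l ++ [(k, 1)] := by
    intro l
    induction l with
    | nil => intro _; rfl
    | cons q t ih =>
        intro hmem
        simp only [List.map_cons, List.mem_cons, not_or] at hmem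
        have hbeq : (q.1 == k) = false := beq_eq_false_iff_ne.mpr (fun h => hmem.1 h.symm)
        simp [pvBumpL, hbeq, ih hmem.2]
  have L2 : ∀ l : List ((String × String) × Int), (l.map Prod.fst).Nodup →
      pvBumpL l k = l.map (fun q => if q.1 == k then (k, (PySem.Dict.mk l).getD k 0 + 1) else q) ∨
      k ∉ l.map Prod.fst := by
    intro l
    induction l with
    | nil => intro _; exact Or.inr (by simp)
    | cons q t ih =>
        intro hnd
        simp only [List.map_cons, List.nodup_cons] at hnd
        obtain ⟨⟨k0, c0⟩, hq⟩ : ∃ q' , q = q' := ⟨q, rfl⟩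
        subst hq
        by_cases hk0 : k0 = k
        · subst hk0
          left
          have hmem : k0 ∉ t.map Prod.fst := hnd.1
          have htid : t.map (fun q => if q.1 == k0 then (k0, c0 + 1) else q) = t := by
            have hpt : ∀ x ∈ t, (fun q => if q.1 == k0 then (k0, c0 + 1) else q) x = id x := by
              intro x hx
              have hxne : x.1 ≠ k0 := fun h => hmem (h ▸ List.mem_map_of_mem hx)
              simp [beq_eq_false_iff_ne.mpr hxne]
            rw [List.map_congr_left hpt, List.map_id]
          have hgd : (PySem.Dict.mk ((k0, c0) :: t)).getD k0 0 = c0 := by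
            rw [PySem.Dict.getD_eq_get?_getD, PySem.Dict.get?_mk_cons]
            simp
          simp only [pvBumpL, List.map_cons, htid, hgd, beq_self_eq_true, if_true]
        · have hbeq : (k0 == k) = false := beq_eq_false_iff_ne.mpr hk0
          rcases ih hnd.2 with h | h
          · left
            have hgd : (PySem.Dict.mk ((k0, c0) :: t)).getD k 0 = (PySem.Dict.mk t).getD k 0 := by
              rw [PySem.Dict.getD_eq_get?_getD, PySem.Dict.get?_mk_cons, hbeq]
              simp [← PySem.Dict.getD_eq_get?_getD]
            simp only [pvBumpL, hbeq, Bool.false_eq_true, if_false, List.map_cons, hgd]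
            rw [h]
          · right
            simp only [List.map_cons, List.mem_cons, not_or]
            exact ⟨fun hh => hk0 hh.symm, h⟩
  intro l hnd
  by_cases hc : (PySem.Dict.mk l).contains k = true
  · have hkmem : k ∈ l.map Prod.fst := by
      have := (PySem.Dict.contains_iff_mem_keys _ _).mp hc
      simpa [PySem.Dict.keys_mk] using this
    rcases L2 l hnd with h | h
    · rw [PySem.Dict.items_insert_of_contains]
      · rw [h]
      · exact hc
    · exact absurd hkmem h
  · rw [Bool.not_eq_true] at hc
    have hkmem : k ∉ l.map Prod.fst := by
      intro hm
      have : k ∈ (PySem.Dict.mk l).keys := by simpa [PySem.Dict.keys_mk] using hm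
      rw [← PySem.Dict.contains_iff_mem_keys] at this
      rw [hc] at this
      exact Bool.false_ne_true this
    rw [PySem.Dict.items_insert_of_not_contains]
    · rw [L1 l hkmem]
      simp [PySem.Dict.getD_of_not_contains, hc]
    · exact hc

theorem pv_main (a p : String) :
    ∀ (l : List ((String × String) × Int)) (acc : PySem.Dict String (PySem.Dict String Int)),
      (l.map Prod.fst).Nodup →
      ((PySem.Dict.mk l).get? (a, p) = none →
        ((acc.getD a PySem.Dict.empty).get? p) = none) →
      pvAsm acc (pvBumpL l (a, p)) = pvStepA (pvAsm acc l) (a, p) := by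
  intro l
  induction l with
  | nil =>
      intro acc _ hacc
      have h0 : (acc.getD a PySem.Dict.empty).get? p = none := hacc rfl
      have hg : (acc.getD a PySem.Dict.empty).getD p 0 = 0 := by
        rw [PySem.Dict.getD_eq_get?_getD, h0]; rfl
      simp [pvAsm, pvBumpL, pvStep2, pvStepA, hg]
  | cons q t ih =>
      intro acc hnd hacc
      obtain ⟨⟨a', p'⟩, c'⟩ := q
      simp only [List.map_cons, List.nodup_cons] at hnd
      by_cases hq : (a', p') = (a, p)
      · have ha : a' = a := congrArg Prod.fst hq
        have hp : p' = p := congrArg Prod.snd hq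
        subst ha; subst hp
        have hbeq : (((a', p'), c').1 == (a', p')) = true := by simp
        have hstep : pvBumpL (((a', p'), c') :: t) (a', p') = ((a', p'), c' + 1) :: t := by
          simp [pvBumpL]
        rw [hstep]
        show pvAsm (pvStep2 acc (a', p') (c' + 1)) t =
          pvStepA (pvAsm (pvStep2 acc (a', p') c') t) (a', p')
        have hpres : (((pvStep2 acc (a', p') c').getD a' PySem.Dict.empty).get? p').isSome = true := by
          simp [pvStep2, PySem.Dict.getD_insert_self, PySem.Dict.get?_insert_self]
        rw [pv_comm a' p' t _ hnd.1 hpres]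
        have : pvStepA (pvStep2 acc (a', p') c') (a', p') = pvStep2 acc (a', p') (c' + 1) := by
          simp [pvStepA, pvStep2, PySem.Dict.getD_insert_self, PySem.Dict.insert_insert_self]
        rw [this]
      · have hbeq : (((a', p'), c').1 == (a, p)) = false := by
          simpa using beq_eq_false_iff_ne.mpr (fun h => hq h)
        have hstep : pvBumpL (((a', p'), c') :: t) (a, p) = ((a', p'), c') :: pvBumpL t (a, p) := by
          simp only [pvBumpL, hbeq, Bool.false_eq_true, if_false]
        rw [hstep]
        show pvAsm (pvStep2 acc (a', p') c') (pvBumpL t (a, p)) =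
          pvStepA (pvAsm (pvStep2 acc (a', p') c') t) (a, p)
        refine ih _ hnd.2 ?_
        intro htn
        have hacc0 : (acc.getD a PySem.Dict.empty).get? p = none := by
          apply hacc
          rw [PySem.Dict.get?_mk_cons]
          simpa [hbeq] using htn
        by_cases ha : a = a'
        · subst ha
          have hp : p ≠ p' := fun hpp => hq (by rw [hpp])
          simpa [pvStep2, PySem.Dict.getD_insert_self, hp,
            PySem.Dict.get?_insert_of_ne] using hacc0
        · simpa [pvStep2, ha, PySem.Dict.getD_insert_of_ne] using hacc0

theorem pv_top : ∀ (ks : List (String × String)),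
    ks.foldl pvStepA PySem.Dict.empty =
      pvAsm PySem.Dict.empty (ks.foldl pvBump PySem.Dict.empty).items := by
  intro ks
  induction ks using List.reverseRecOn with
  | nil => rfl
  | append_singleton ks k ih =>
      obtain ⟨ka, kp⟩ := k
      rw [List.foldl_append, List.foldl_append]
      simp only [List.foldl_cons, List.foldl_nil]
      have hF : ((ks.foldl pvBump PySem.Dict.empty).items.map Prod.fst).Nodup := by
        have h0 : (PySem.Dict.empty : PySem.Dict (String × String) Int).keys.Nodup :=
          PySem.Dict.nodup_keys_empty
        have := PySem.Dict.nodup_keys_foldl_insert ks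
          (fun (d : PySem.Dict (String × String) Int) x => d.getD x 0 + 1) PySem.Dict.empty h0
        simpa [PySem.Dict.keys, pvBump] using this
      have hb : (pvBump (ks.foldl pvBump PySem.Dict.empty) (ka, kp)).items =
          pvBumpL (ks.foldl pvBump PySem.Dict.empty).items (ka, kp) := by
        exact pv_bumpL_eq (ka, kp) (ks.foldl pvBump PySem.Dict.empty).items hF
      rw [hb, pv_main ka kp (ks.foldl pvBump PySem.Dict.empty).items PySem.Dict.empty hF
        (fun _ => by simp [PySem.Dict.getD_empty, PySem.Dict.get?_empty]), ih]

-- ===== VERDICT (by name: the statement is the Claim_ definition above) =====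
theorem arrest_count_age_pd_cd_spec : Claim_equal_arrest_count_age_pd_cd := by
  intro data _ _
  show arrest_count_age_pd_cd data = arrest_count_age_pd_cd_alt data
  simp only [arrest_count_age_pd_cd, arrest_count_age_pd_cd_alt]
  have hA2 : (fun (d : PySem.Dict String (PySem.Dict String Int)) (row : List (String × String)) =>
      match (PySem.Dict.mk row).get? "AGE_GROUP", (PySem.Dict.mk row).get? "PD_CD" with
      | some age_group, some pd_code =>
          let d := if d.contains age_group then d else d.insert age_group PySem.Dict.empty
          let inner := d.getD age_group PySem.Dict.empty
          let inner := if inner.contains pd_code then inner else inner.insert pd_code (0 : Int)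
          d.insert age_group (inner.insert pd_code (inner.getD pd_code 0 + 1))
      | _, _ => d)
      = (fun d row =>
      match (PySem.Dict.mk row).get? "AGE_GROUP", (PySem.Dict.mk row).get? "PD_CD" with
      | some a, some p => pvStepA d (a, p)
      | _, _ => d) := by
    funext d row
    cases (PySem.Dict.mk row).get? "AGE_GROUP" with
    | none => rfl
    | some a =>
        cases (PySem.Dict.mk row).get? "PD_CD" with
        | none => rfl
        | some p => exact pv_stepA_eq d a p
  have hB2 : (fun (f : PySem.Dict (String × String) Int) (row : List (String × String)) =>
      match (PySem.Dict.mk row).get? "AGE_GROUP" with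
      | none => f
      | some age =>
          match (PySem.Dict.mk row).get? "PD_CD" with
          | none => f
          | some pd => f.insert (age, pd) (f.getD (age, pd) 0 + 1))
      = (fun f row =>
      match (PySem.Dict.mk row).get? "AGE_GROUP", (PySem.Dict.mk row).get? "PD_CD" with
      | some a, some p => pvBump f (a, p)
      | _, _ => f) := by
    funext f row
    cases (PySem.Dict.mk row).get? "AGE_GROUP" with
    | none => rfl
    | some a =>
        cases (PySem.Dict.mk row).get? "PD_CD" with
        | none => rfl
        | some p => rfl
  have hB3 : (fun (r : PySem.Dict String (PySem.Dict String Int))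
      (q : (String × String) × Int) =>
      let r := if r.contains q.1.1 then r else r.insert q.1.1 PySem.Dict.empty
      r.insert q.1.1 ((r.getD q.1.1 PySem.Dict.empty).insert q.1.2 q.2))
      = (fun r q => pvStep2 r q.1 q.2) := by
    funext r q
    exact pv_step2_eq r q.1.1 q.1.2 q.2
  rw [hA2, hB2, hB3, pv_foldl_extract pvStepA data PySem.Dict.empty,
    pv_foldl_extract pvBump data PySem.Dict.empty]
  show ((pvExtract data).foldl pvStepA PySem.Dict.empty).items.map (fun q => (q.1, q.2.items))
    = (pvAsm PySem.Dict.empty ((pvExtract data).foldl pvBump PySem.Dict.empty).items).items.map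
        (fun q => (q.1, q.2.items))
  rw [pv_top (pvExtract data)]
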